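-- pv_equiv track=rewrite | github.com/liampertile/TP_SSL_LEXER | AFD.py | afd_puntoycoma
-- ===== SOURCE A (Python) =====
-- ESTADO_ACEPTADO = "ESTADO ACEPTADO"
--
-- ESTADO_TRAMPA = "ESTADO TRAMPA"
--
-- def afd_puntoycoma(cadena):
--     estado_actual = 0
--     estados_aceptados = [1]
--     for caracter in cadena:
--         if estado_actual == 0 and caracter == ';':
--             estado_actual = 1
--         else:
--             estado_actual = -1
--             return ESTADO_TRAMPA
--
--     if estado_actual in estados_aceptados:
--         return ESTADO_ACEPTADO
-- ===== SOURCE B (Python) =====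
-- ESTADO_ACEPTADO = "ESTADO ACEPTADO"
--
-- ESTADO_TRAMPA = "ESTADO TRAMPA"
--
-- def afd_puntoycoma(cadena):
--     chars = list(cadena)
--     if not chars:
--         return None
--     if chars == [';']:
--         return ESTADO_ACEPTADO
--     return ESTADO_TRAMPA
-- ===== Notes on version B (the rewrite author's own statement) =====
-- stated objective: simpler
-- what changed: Replaces the per-character DFA state loop with a single closed-form length/content check: accept exactly the one-character sequence [';'].
-- outside the precondition, e.g. on afd_puntoycoma(''): A returns None, B returns None
import Mathlib
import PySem

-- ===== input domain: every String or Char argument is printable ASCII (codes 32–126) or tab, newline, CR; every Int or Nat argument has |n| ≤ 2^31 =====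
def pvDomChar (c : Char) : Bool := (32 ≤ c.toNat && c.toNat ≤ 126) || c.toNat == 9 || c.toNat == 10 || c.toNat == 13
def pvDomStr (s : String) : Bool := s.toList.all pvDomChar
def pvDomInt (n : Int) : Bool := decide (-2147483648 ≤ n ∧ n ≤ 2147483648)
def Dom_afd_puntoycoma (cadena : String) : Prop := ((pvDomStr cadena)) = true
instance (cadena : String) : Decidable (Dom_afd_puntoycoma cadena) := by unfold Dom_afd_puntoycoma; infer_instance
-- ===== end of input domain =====

-- B replaces A's DFA state loop by one closed-form check (accepted iff the input is exactly ";");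
-- equivalence is proved on nonempty strings, where A returns a string (on "" A returns None).

-- ===== PORT A =====
-- literal transliteration of A's for-loop with early return: the loop either returns
-- "ESTADO TRAMPA" early or finishes with a final state, then the acceptance test runs.
def afdA_loop (cs : List Char) (estado_actual : Int) : String :=
  match cs with
  | [] => if [(1 : Int)].contains estado_actual then "ESTADO ACEPTADO" else ""  -- Python returns None here; unreachable inside Pre_
  | caracter :: rest =>
      if estado_actual = 0 ∧ caracter = ';' then afdA_loop rest 1
      else "ESTADO TRAMPA"

def afd_puntoycoma (cadena : String) : String :=
  afdA_loop cadena.toList 0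

-- ===== PORT B =====
def afd_puntoycoma_alt (cadena : String) : String :=
  let chars := cadena.toList
  if chars = [] then ""  -- Python B returns None here; unreachable inside Pre_
  else if chars = [';'] then "ESTADO ACEPTADO"
  else "ESTADO TRAMPA"

-- ===== PRECONDITION & SPEC =====
-- Pre_ excludes the empty string, on which A (and B) return None, not a value of the declared String type.
def Pre_afd_puntoycoma (cadena : String) : Prop := cadena ≠ ""
instance (cadena : String) : Decidable (Pre_afd_puntoycoma cadena) := by unfold Pre_afd_puntoycoma; infer_instance
def pvWitness_afd_puntoycoma : String := ";"
def Spec_afd_puntoycoma (cadena : String) (out : String) : Prop := out = afd_puntoycoma_alt cadena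
instance (cadena : String) (out : String) : Decidable (Spec_afd_puntoycoma cadena out) := by unfold Spec_afd_puntoycoma; infer_instance

-- ===== CLAIM (what is proved, stated in full; the proofs are below) =====
def Claim_equal_afd_puntoycoma : Prop := ∀ (cadena : String), Dom_afd_puntoycoma cadena → Pre_afd_puntoycoma cadena → Spec_afd_puntoycoma cadena (afd_puntoycoma cadena)

-- ===== LEMMAS AND PROOFS =====

theorem toList_ne_nil (s : String) (h : s ≠ "") : s.toList ≠ [] := by
  intro hc
  apply h
  have := congrArg String.ofList hc
  simpa using this

-- ===== VERDICT (by name: the statement is the Claim_ definition above) =====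
theorem afd_puntoycoma_spec : Claim_equal_afd_puntoycoma := by
  intro cadena _ hpre
  unfold Spec_afd_puntoycoma afd_puntoycoma afd_puntoycoma_alt
  have hne := toList_ne_nil cadena hpre
  cases hcs : cadena.toList with
  | nil => exact absurd hcs hne
  | cons c rest =>
    simp only [afdA_loop]
    by_cases hc : c = ';'
    · cases rest with
      | nil => simp [afdA_loop, hc]
      | cons d r => simp [afdA_loop, hc]
    · simp [hc]
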